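-- pv_equiv track=rewrite | github.com/johannthefabulos/worker_bot | tests/Strats.py | get_binary_permutations
-- ===== SOURCE A (Python) =====
-- def get_binary_permutations(n = 2, base = 2):
--     perms = []
--     for permutation in range(base ** n):
--         this_perm = []
--         for i in range(n):
--             x = permutation % base
--             permutation //= base
--             this_perm = [x] + this_perm
--         perms.append(this_perm)
--     return perms
-- ===== SOURCE B (Python) =====
-- def get_binary_permutations(n = 2, base = 2):
--     perms = [[]]
--     for _ in range(n):
--         perms = [[x] + r for x in range(base) for r in perms]
--     return perms
-- ===== Notes on version B (the rewrite author's own statement) =====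
-- stated objective: simpler
-- what changed: Replaces arithmetic base-conversion of an integer counter (div/mod digit extraction per row) by direct enumeration: the sequence set is built length-by-length, one flat-product extension step per position.
-- intended difference: For negative base with even n >= 2, A returns base**n rows of floor-mod 'digits' with negative entries (an artefact of Python's floor division), while B returns [] because there are no digits in range(base); the empty enumeration is the intended value. — e.g. on get_binary_permutations(2, -2): A returns [[0, 0], [-1, -1], [-1, 0], [0, -1]], B returns []
import Mathlib
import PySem

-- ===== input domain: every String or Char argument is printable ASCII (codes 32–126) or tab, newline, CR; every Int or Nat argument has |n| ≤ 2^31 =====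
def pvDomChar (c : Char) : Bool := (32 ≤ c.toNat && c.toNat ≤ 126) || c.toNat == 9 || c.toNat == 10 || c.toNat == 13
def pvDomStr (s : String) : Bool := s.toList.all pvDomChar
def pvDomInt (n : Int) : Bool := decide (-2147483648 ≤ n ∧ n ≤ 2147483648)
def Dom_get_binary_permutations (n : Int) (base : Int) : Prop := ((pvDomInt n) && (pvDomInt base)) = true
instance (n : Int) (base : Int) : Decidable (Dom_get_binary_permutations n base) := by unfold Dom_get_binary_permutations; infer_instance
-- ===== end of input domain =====

-- B builds the sequences by extending length-by-length (one flat-product step per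
-- position) instead of extracting base-ary digits of an integer counter with div/mod
-- as A does; same order, same cost.

-- ===== PORT A =====
def get_binary_permutations (n : Int) (base : Int) : List (List Int) :=
  (PySem.List.pyRange 0 (base ^ n.toNat) 1).foldl
    (fun perms permutation =>
      let st := (PySem.List.pyRange 0 n 1).foldl
        (fun (st : Int × List Int) _ =>
          (PySem.Int.floordiv st.1 base, [PySem.Int.mod st.1 base] ++ st.2))
        (permutation, ([] : List Int))
      perms ++ [st.2]) []

-- ===== PORT B =====
def get_binary_permutations_alt (n : Int) (base : Int) : List (List Int) :=
  (PySem.List.pyRange 0 n 1).foldl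
    (fun perms _ =>
      (PySem.List.pyRange 0 base 1).flatMap
        (fun x => perms.map (fun r => [x] ++ r)))
    [[]]

-- ===== PRECONDITION & SPEC =====
-- Pre_ excludes n < 0, where A always raises (TypeError from range(float), or
-- ZeroDivisionError for base 0): exactly the inputs on which A returns normally.
def Pre_get_binary_permutations (n : Int) (base : Int) : Prop := 0 ≤ n
instance (n : Int) (base : Int) : Decidable (Pre_get_binary_permutations n base) := by
  unfold Pre_get_binary_permutations; infer_instance
def pvWitness_get_binary_permutations : Int × Int := (2, 2)

-- For negative base with even n ≥ 2, A returns base**n rows of floor-mod "digits" with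
-- negative entries (an artefact of Python's floor division), while B returns [] because
-- there are no digits in range(base); the empty enumeration is the intended value.
def D_get_binary_permutations (n : Int) (base : Int) : Prop :=
  base < 0 ∧ 2 ≤ n ∧ n % 2 = 0
instance (n : Int) (base : Int) : Decidable (D_get_binary_permutations n base) := by
  unfold D_get_binary_permutations; infer_instance

def Spec_get_binary_permutations (n : Int) (base : Int) (out : List (List Int)) : Prop :=
  ¬ D_get_binary_permutations n base → out = get_binary_permutations_alt n base
instance (n : Int) (base : Int) (out : List (List Int)) :
    Decidable (Spec_get_binary_permutations n base out) := by
  unfold Spec_get_binary_permutations; infer_instance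

def pvDiffWitness_get_binary_permutations : Int × Int := (2, -2)
def pvDiffWitnessOut_get_binary_permutations : (List (List Int)) × (List (List Int)) :=
  ([[0, 0], [-1, -1], [-1, 0], [0, -1]], [])

-- ===== CLAIM (what is proved, stated in full; the proofs are below) =====
def Claim_unchanged_get_binary_permutations : Prop := ∀ (n : Int) (base : Int), Dom_get_binary_permutations n base → Pre_get_binary_permutations n base → Spec_get_binary_permutations n base (get_binary_permutations n base)
def Claim_changed_get_binary_permutations : Prop := Dom_get_binary_permutations (pvDiffWitness_get_binary_permutations.1) (pvDiffWitness_get_binary_permutations.2) ∧ Pre_get_binary_permutations (pvDiffWitness_get_binary_permutations.1) (pvDiffWitness_get_binary_permutations.2) ∧ D_get_binary_permutations (pvDiffWitness_get_binary_permutations.1) (pvDiffWitness_get_binary_permutations.2) ∧ get_binary_permutations (pvDiffWitness_get_binary_permutations.1) (pvDiffWitness_get_binary_permutations.2) = pvDiffWitnessOut_get_binary_permutations.1 ∧ get_binary_permutations_alt (pvDiffWitness_get_binary_permutations.1) (pvDiffWitness_get_binary_permutations.2) = pvDiffWitnessOut_get_binary_permutations.2 ∧ pvDiffWitnessOut_get_binary_permutations.1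 ≠ pvDiffWitnessOut_get_binary_permutations.2
def Claim_exact_get_binary_permutations : Prop := ∀ (n : Int) (base : Int), Dom_get_binary_permutations n base → Pre_get_binary_permutations n base → D_get_binary_permutations n base → get_binary_permutations n base ≠ get_binary_permutations_alt n base

-- ===== LEMMAS AND PROOFS =====

-- B's loop, as a function of the number of iterations
def gbpAltRec (base : Int) : Nat → List (List Int)
  | 0 => [[]]
  | m + 1 =>
    (PySem.List.pyRange 0 base 1).flatMap
      (fun x => (gbpAltRec base m).map (fun r => [x] ++ r))

-- the inner digit-extraction loop of A, abstracted (b fixed; acc generalized)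
def digAux (b : Int) : Nat → Int → List Int → List Int
  | 0, _, acc => acc
  | m + 1, k, acc => digAux b m (PySem.Int.floordiv k b) (PySem.Int.mod k b :: acc)

def dig (b : Int) (m : Nat) (k : Int) : List Int := digAux b m k []

theorem foldl_const_ignore {α β : Type} (F : β → β) (xs : List α) (st : β) :
    xs.foldl (fun s _ => F s) st = F^[xs.length] st := by
  induction xs generalizing st with
  | nil => rfl
  | cons x xs ih => simp [List.foldl_cons, ih, Function.iterate_succ_apply]

theorem iterate_inner_snd (b : Int) (m : Nat) (k : Int) (acc : List Int) :
    ((fun (st : Int × List Int) =>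
        (PySem.Int.floordiv st.1 b, [PySem.Int.mod st.1 b] ++ st.2))^[m] (k, acc)).2
      = digAux b m k acc := by
  induction m generalizing k acc with
  | zero => rfl
  | succ m ih => rw [Function.iterate_succ_apply]; exact ih _ _

theorem digAux_append (b : Int) (m : Nat) (k : Int) (acc : List Int) :
    digAux b m k acc = digAux b m k [] ++ acc := by
  induction m generalizing k acc with
  | zero => rfl
  | succ m ih =>
    simp only [digAux]
    rw [ih, ih (acc := [PySem.Int.mod k b])]
    simp

theorem dig_succ (b : Int) (m : Nat) (k : Int) :
    dig b (m + 1) k = dig b m (PySem.Int.floordiv k b) ++ [PySem.Int.mod k b] := by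
  simp only [dig, digAux]
  exact digAux_append b m _ _

-- the most-significant digit splits off: dig (m+1) (x*b^m + r) = x :: dig m r
theorem dig_split (b : Int) (hb : 0 < b) (m : Nat) (x r : Int)
    (hx0 : 0 ≤ x) (hxb : x < b) (hr0 : 0 ≤ r) (hrm : r < b ^ m) :
    dig b (m + 1) (x * b ^ m + r) = x :: dig b m r := by
  induction m generalizing r with
  | zero =>
    have hr : r = 0 := by
      have h1 : r < 1 := by simpa using hrm
      omega
    subst hr
    have hx : x * b ^ 0 + 0 = x := by ring
    rw [hx, dig_succ, PySem.Int.mod_eq_emod_of_pos hb, Int.emod_eq_of_lt hx0 hxb]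
    rfl
  | succ m ih =>
    have hkey : x * b ^ (m + 1) + r = r + b * (x * b ^ m) := by ring
    rw [dig_succ, hkey]
    have hfd : PySem.Int.floordiv (r + b * (x * b ^ m)) b = x * b ^ m + r / b := by
      rw [PySem.Int.floordiv_eq_ediv_of_pos hb,
        Int.add_mul_ediv_left _ _ (by omega : b ≠ 0)]
      ring
    have hmd : PySem.Int.mod (r + b * (x * b ^ m)) b = r % b := by
      rw [PySem.Int.mod_eq_emod_of_pos hb, Int.add_mul_emod_self_left]
    have hq0 : 0 ≤ r / b := Int.ediv_nonneg hr0 (le_of_lt hb)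
    have hqm : r / b < b ^ m := by
      rw [Int.ediv_lt_iff_lt_mul hb]
      calc r < b ^ (m + 1) := hrm
        _ = b ^ m * b := by ring
    rw [hfd, hmd, ih (r / b) hq0 hqm]
    have hrd : dig b (m + 1) r = dig b m (r / b) ++ [r % b] := by
      rw [dig_succ, PySem.Int.floordiv_eq_ediv_of_pos hb,
        PySem.Int.mod_eq_emod_of_pos hb]
    rw [hrd]
    simp

-- range(j*c) splits into j consecutive blocks of length c
theorem pyRange_mul_split (j : Nat) (c : Int) (hc : 0 ≤ c) :
    PySem.List.pyRange 0 ((j : Int) * c) 1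
      = (PySem.List.pyRange 0 (j : Int) 1).flatMap
          (fun x => (PySem.List.pyRange 0 c 1).map (fun r => x * c + r)) := by
  induction j with
  | zero => simp [PySem.List.pyRange_one_eq_nil]
  | succ j ih =>
    have hjc : (0 : Int) ≤ (j : Int) * c := mul_nonneg (by positivity) hc
    have hsplit : PySem.List.pyRange 0 ((j : Int) + 1) 1
        = PySem.List.pyRange 0 (j : Int) 1 ++ [(j : Int)] :=
      PySem.List.pyRange_one_succ_right (by positivity)
    have hblock : PySem.List.pyRange ((j : Int) * c) ((j : Int) * c + c) 1
        = (PySem.List.pyRange 0 c 1).map (fun r => (j : Int) * c + r) := by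
      rw [PySem.List.pyRange_one, PySem.List.pyRange_one]
      simp [List.map_map, Function.comp]
    have hmul : ((j : Int) + 1) * c = (j : Int) * c + c := by ring
    push_cast
    rw [hmul, PySem.List.pyRange_one_append 0 ((j : Int) * c) ((j : Int) * c + c) hjc (by omega),
      hsplit, List.flatMap_append, ← ih, hblock]
    simp

-- main enumeration lemma for a positive base
theorem map_dig_eq_altRec (b : Int) (hb : 0 < b) (m : Nat) :
    (PySem.List.pyRange 0 (b ^ m) 1).map (dig b m) = gbpAltRec b m := by
  induction m with
  | zero =>
    have h1 : PySem.List.pyRange 0 (b ^ 0) 1 = [0] := by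
      rw [pow_zero]
      have := PySem.List.pyRange_one_singleton (0 : Int)
      simpa using this
    rw [h1]; rfl
  | succ m ih =>
    have hbpow : (0 : Int) ≤ b ^ m := le_of_lt (pow_pos hb m)
    have hbn : ((b.toNat : Nat) : Int) = b := by omega
    have hsplit := pyRange_mul_split b.toNat (b ^ m) hbpow
    rw [hbn] at hsplit
    have hpow : b ^ (m + 1) = b * b ^ m := by ring
    rw [hpow, hsplit]
    simp only [gbpAltRec]
    rw [List.flatMap_def, List.flatMap_def, List.map_flatten, List.map_map]
    congr 1
    apply List.map_congr_left
    intro x hx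
    obtain ⟨hx0, hxb⟩ := (PySem.List.mem_pyRange_one).1 hx
    simp only [Function.comp, List.map_map]
    rw [← ih, List.map_map]
    apply List.map_congr_left
    intro r hr
    obtain ⟨hr0, hrm⟩ := (PySem.List.mem_pyRange_one).1 hr
    exact dig_split b hb m x r hx0 hxb hr0 hrm

-- A\'s port is the map of the digit function over the counter range
theorem portA_eq_map (n b : Int) :
    get_binary_permutations n b
      = (PySem.List.pyRange 0 (b ^ n.toNat) 1).map (dig b n.toNat) := by
  unfold get_binary_permutations
  rw [PySem.List.foldl_append_singleton_eq_map]
  simp only [List.nil_append]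
  apply List.map_congr_left
  intro p _
  show ((PySem.List.pyRange 0 n 1).foldl
      (fun (st : Int × List Int) _ =>
        (PySem.Int.floordiv st.1 b, [PySem.Int.mod st.1 b] ++ st.2)) (p, [])).2
    = dig b n.toNat p
  rw [foldl_const_ignore]
  rw [iterate_inner_snd b (PySem.List.pyRange 0 n 1).length p []]
  rw [PySem.List.length_pyRange_one]
  simp [dig]

-- B's loop unrolled: n.toNat extension steps
theorem alt_eq_rec (n b : Int) :
    get_binary_permutations_alt n b = gbpAltRec b n.toNat := by
  unfold get_binary_permutations_alt
  rw [foldl_const_ignore]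
  rw [PySem.List.length_pyRange_one]
  have hlen : (n - 0).toNat = n.toNat := by omega
  rw [hlen]
  induction n.toNat with
  | zero => rfl
  | succ m ih => rw [Function.iterate_succ_apply', ih]; rfl

-- B's port is [] whenever base ≤ 0 and n ≥ 1
theorem alt_eq_nil (n b : Int) (hb : b ≤ 0) (hn : 1 ≤ n) :
    get_binary_permutations_alt n b = [] := by
  rw [alt_eq_rec]
  have h1 : n.toNat = n.toNat - 1 + 1 := by omega
  rw [h1]
  simp [gbpAltRec, PySem.List.pyRange_one_eq_nil hb]

-- ===== VERDICT (by name: the statement is the Claim_ definition above) =====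
theorem get_binary_permutations_spec : Claim_unchanged_get_binary_permutations := by
  intro n b _ hpre hnd
  have hn : 0 ≤ n := hpre
  by_cases hb : 0 < b
  · show get_binary_permutations n b = get_binary_permutations_alt n b
    rw [portA_eq_map, alt_eq_rec]
    exact map_dig_eq_altRec b hb n.toNat
  · rw [not_lt] at hb
    by_cases hn0 : n = 0
    · subst hn0
      show get_binary_permutations 0 b = get_binary_permutations_alt 0 b
      rw [portA_eq_map]
      have h1 : PySem.List.pyRange 0 (b ^ (0 : Int).toNat) 1 = [0] := by
        have := PySem.List.pyRange_one_singleton (0 : Int)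
        simpa using this
      rw [h1, alt_eq_rec]
      rfl
    · have hn1 : 1 ≤ n := by omega
      have hpowle : b ^ n.toNat ≤ 0 := by
        rcases lt_or_eq_of_le hb with hblt | hbeq
        · -- b < 0; ¬D gives n odd (n ≥ 1)
          have hodd : n % 2 = 1 := by
            unfold D_get_binary_permutations at hnd
            omega
          have : Odd n.toNat := by
            rw [Nat.odd_iff]; omega
          exact le_of_lt (Odd.pow_neg this hblt)
        · rw [hbeq, zero_pow (by omega : n.toNat ≠ 0)]
      show get_binary_permutations n b = get_binary_permutations_alt n b
      rw [portA_eq_map, PySem.List.pyRange_one_eq_nil hpowle,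
        alt_eq_nil n b hb hn1]
      rfl

theorem get_binary_permutations_changed : Claim_changed_get_binary_permutations := by
  unfold Claim_changed_get_binary_permutations; decide

theorem get_binary_permutations_tight : Claim_exact_get_binary_permutations := by
  intro n b _ _ hd
  obtain ⟨hb, hn2, hev⟩ := hd
  have halt : get_binary_permutations_alt n b = [] := alt_eq_nil n b (le_of_lt hb) (by omega)
  have hpow : 0 < b ^ n.toNat := by
    have : Even n.toNat := by rw [Nat.even_iff]; omega
    exact this.pow_pos (by omega : b ≠ 0)
  rw [portA_eq_map, halt, PySem.List.pyRange_one_cons (by omega : (0 : Int) < b ^ n.toNat)]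
  simp
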